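-- pv_equiv track=rewrite | github.com/jiachen0212/daydayup | line_en_decoder.py | encoder_line
-- ===== SOURCE A (Python) =====
-- def encoder_line(line):
-- 	points = ['.', '..', '...', ',', '!', '!!!', '~']
-- 	encoder_line = ''
-- 	for word in line.split(' '):
-- 		word_number = ''
-- 		for char in word:
-- 			if char in points:
-- 				word_number += char
-- 			else:
-- 				word_number += str(ord(char))+'_'
-- 		encoder_line += word_number
-- 		encoder_line += '_'
-- 	encoder_line = encoder_line[:-1]
-- 	return encoder_line
-- ===== SOURCE B (Python) =====
-- def encoder_line(line):
--     # one pass over the characters: space -> '_', single punctuation kept,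
--     # any other char -> its ordinal followed by '_'; no final strip needed.
--     points = {'.', ',', '!', '~'}
--     out = []
--     for char in line:
--         if char == ' ':
--             out.append('_')
--         elif char in points:
--             out.append(char)
--         else:
--             out.append(str(ord(char)) + '_')
--     return ''.join(out)
-- ===== Notes on version B (the rewrite author's own statement) =====
-- stated objective: simpler
-- what changed: Replaced the split-on-space plus nested per-word loop and final strip with a single pass over the characters of line, emitting the separator for spaces, keeping single punctuation, and ord+separator otherwise.
import Mathlib
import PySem

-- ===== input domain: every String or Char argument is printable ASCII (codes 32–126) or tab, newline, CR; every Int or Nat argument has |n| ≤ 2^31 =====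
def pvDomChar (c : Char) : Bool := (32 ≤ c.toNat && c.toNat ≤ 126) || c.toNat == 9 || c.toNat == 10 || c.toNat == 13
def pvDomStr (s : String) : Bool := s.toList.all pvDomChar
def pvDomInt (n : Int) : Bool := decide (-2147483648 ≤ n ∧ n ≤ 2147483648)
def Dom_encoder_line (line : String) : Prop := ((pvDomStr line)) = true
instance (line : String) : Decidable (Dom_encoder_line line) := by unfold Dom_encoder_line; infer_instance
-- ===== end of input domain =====

-- B replaces A's split-by-space + nested word loop with a single pass over the
-- characters (space → '_', kept punctuation, otherwise ord + '_'), no final strip.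

-- ===== PORT A =====
def aPoints : List (List Char) :=
  [['.'], ['.', '.'], ['.', '.', '.'], [','], ['!'], ['!', '!', '!'], ['~']]

def encWordA (word : List Char) : List Char :=
  word.foldl (fun wn c =>
    if [c] ∈ aPoints then wn ++ [c]
    else wn ++ (PySem.Int.toChars (c.toNat : Int) ++ ['_'])) []

def encoder_line (line : String) : String :=
  let words := PySem.Chars.splitOn line.toList [' ']
  let enc := words.foldl (fun acc w => (acc ++ encWordA w) ++ ['_']) []
  String.ofList (PySem.List.slice enc none (some (-1)))

-- ===== PORT B =====
def encCharB (c : Char) : List Char :=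
  if c = ' ' then ['_']
  else if c ∈ ['.', ',', '!', '~'] then [c]
  else PySem.Int.toChars (c.toNat : Int) ++ ['_']

def encoder_line_alt (line : String) : String :=
  String.ofList ((line.toList.map encCharB).flatten)

-- ===== PRECONDITION & SPEC =====
def Spec_encoder_line (line : String) (out : String) : Prop := out = encoder_line_alt line
instance (line : String) (out : String) : Decidable (Spec_encoder_line line out) := by unfold Spec_encoder_line; infer_instance

-- ===== CLAIM (what is proved, stated in full; the proofs are below) =====
def Claim_equal_encoder_line : Prop := ∀ (line : String), Dom_encoder_line line → Spec_encoder_line line (encoder_line line)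

-- ===== LEMMAS AND PROOFS =====

def encCharA (c : Char) : List Char :=
  if [c] ∈ aPoints then [c] else PySem.Int.toChars (c.toNat : Int) ++ ['_']

lemma encWordA_foldl (w : List Char) (acc : List Char) :
    w.foldl (fun wn c =>
      if [c] ∈ aPoints then wn ++ [c]
      else wn ++ (PySem.Int.toChars (c.toNat : Int) ++ ['_'])) acc
    = acc ++ (w.map encCharA).flatten := by
  induction w generalizing acc with
  | nil => simp
  | cons c rest ih =>
    simp only [List.foldl_cons, List.map_cons, List.flatten_cons, ih, encCharA]
    by_cases h : [c] ∈ aPoints <;> simp [h]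

lemma encWordA_eq (w : List Char) : encWordA w = (w.map encCharA).flatten := by
  simpa using encWordA_foldl w []

lemma encCharA_eq_B {c : Char} (h : c ≠ ' ') : encCharA c = encCharB c := by
  unfold encCharA encCharB aPoints
  by_cases hp : c ∈ ['.', ',', '!', '~']
  · fin_cases hp <;> simp
  · simp only [List.mem_cons, List.not_mem_nil, or_false] at hp
    push Not at hp
    obtain ⟨h1, h2, h3, h4⟩ := hp
    simp [h, h1, h2, h3, h4]

def gWord (w : List Char) : List Char := encWordA w ++ ['_']

lemma foldl_words (ws : List (List Char)) (acc : List Char) :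
    ws.foldl (fun acc w => (acc ++ encWordA w) ++ ['_']) acc
    = acc ++ (ws.map gWord).flatten := by
  induction ws generalizing acc with
  | nil => simp
  | cons w rest ih =>
    simp only [List.foldl_cons, ih, List.map_cons, List.flatten_cons]
    simp [gWord]

lemma go_flatten : ∀ (fuel : Nat) (l cur : List Char) (acc : List (List Char)), l.length < fuel →
    ((PySem.Chars.splitOn.go [' '] fuel l cur acc).map gWord).flatten
    = (acc.reverse.map gWord).flatten ++ encWordA cur.reverse
        ++ (l.map encCharB).flatten ++ ['_'] := by
  intro fuel
  induction fuel with
  | zero => intro l cur acc h; omega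
  | succ fuel ih =>
    intro l cur acc h
    cases l with
    | nil =>
      simp [PySem.Chars.splitOn.go, gWord, List.reverse_cons]
    | cons c rest =>
      by_cases hc : c = ' '
      · subst hc
        have hpre : ([' '] : List Char).isPrefixOf (' ' :: rest) = true := by
          simp [List.isPrefixOf]
        rw [PySem.Chars.splitOn.go]
        simp only [hpre, if_pos]
        have hd : List.drop ([' '] : List Char).length (' ' :: rest) = rest := by simp
        rw [hd, ih rest [] ((cur.reverse) :: acc) (by simpa using Nat.lt_of_succ_lt_succ h)]
        simp [gWord, encWordA_eq, encCharB]
      · have hpre : ([' '] : List Char).isPrefixOf (c :: rest) = false := by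
          simp [List.isPrefixOf]
          exact fun hco => absurd hco.symm hc
        rw [PySem.Chars.splitOn.go]
        simp only [hpre, Bool.false_eq_true, if_false]
        have := ih rest (c :: cur) acc (by simpa using Nat.lt_of_succ_lt_succ h)
        rw [this]
        have hw : encWordA ((c :: cur).reverse) = encWordA cur.reverse ++ encCharA c := by
          simp [encWordA_eq]
        rw [hw, encCharA_eq_B hc]
        simp

lemma splitOn_flatten (cs : List Char) :
    ((PySem.Chars.splitOn cs [' ']).map gWord).flatten
    = (cs.map encCharB).flatten ++ ['_'] := by
  have := go_flatten (cs.length + 1) cs [] [] (by omega)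
  simpa [PySem.Chars.splitOn, encWordA_eq] using this

-- ===== VERDICT (by name: the statement is the Claim_ definition above) =====
theorem encoder_line_spec : Claim_equal_encoder_line := by
  intro line _
  unfold Spec_encoder_line encoder_line encoder_line_alt
  simp only [foldl_words, List.nil_append, splitOn_flatten]
  congr 1
  simp [PySem.List.slice]
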